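-- pv_equiv track=rewrite | github.com/KrishnaKothandaraman/Artificial-Intelligence-Northeastern | Assignment_2/multiagent/multiAgents.py | getClosestFromList
-- ===== SOURCE A (Python) =====
-- def getManhattanDistance(s1, s2):
--     return abs(s1[0] - s2[0]) + abs(s1[1] - s2[1])
--
-- def getClosestFromList(listOfPositions, referencePosition):
--     """
--     Returns the index of manhattan distance from the listOfPositions to referencePosition
--
--     :param listOfPositions: Iterable of tuples
--     :param referencePosition: Position to calculate distance from
--     :return: 0-based index from listOfPositions
--     """
--     minIdx = 0
--     minDist = float('inf')
--
--     for i in range(len(listOfPositions)):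
--         curDist = getManhattanDistance(referencePosition, listOfPositions[i])
--         if curDist < minDist:
--             minIdx = i
--             minDist = curDist
--
--     return minIdx
-- ===== SOURCE B (Python) =====
-- def getClosestFromList(listOfPositions, referencePosition):
--     order = sorted(range(len(listOfPositions)),
--                    key=lambda i: abs(referencePosition[0] - listOfPositions[i][0])
--                                + abs(referencePosition[1] - listOfPositions[i][1]))
--     return order[0] if order else 0
-- ===== Notes on version B (the rewrite author's own statement) =====
-- stated objective: alternative
-- what changed: Replaces A's fused running-minimum scan (minIdx/minDist with a float('inf') sentinel) by stably sorting the index range by distance key and taking the first index of the sorted order (stability preserves A's first-minimum tie-break; empty list still yields 0).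
import Mathlib
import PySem

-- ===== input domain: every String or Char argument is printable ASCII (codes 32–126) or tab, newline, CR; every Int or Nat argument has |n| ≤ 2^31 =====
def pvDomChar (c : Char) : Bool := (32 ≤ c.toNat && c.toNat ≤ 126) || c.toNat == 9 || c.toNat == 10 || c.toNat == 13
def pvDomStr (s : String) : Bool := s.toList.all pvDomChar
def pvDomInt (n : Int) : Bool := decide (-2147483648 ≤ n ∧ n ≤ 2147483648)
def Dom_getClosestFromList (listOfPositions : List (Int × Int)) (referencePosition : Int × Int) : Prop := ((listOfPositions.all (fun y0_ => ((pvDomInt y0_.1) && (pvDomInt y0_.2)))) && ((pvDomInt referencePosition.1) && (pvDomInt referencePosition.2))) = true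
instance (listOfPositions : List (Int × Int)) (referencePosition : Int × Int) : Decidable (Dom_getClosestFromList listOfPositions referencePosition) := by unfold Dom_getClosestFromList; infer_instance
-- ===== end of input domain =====

-- ===== PORT A =====
-- B replaces A's fused running-minimum scan by a stable sort of the index range
-- by distance key, taking the first index of the sorted order (alternative algorithm).
-- A's float('inf') sentinel is ported with Option Int (none = inf; every real distance
-- is a finite integer, so `cur < inf` is always true on the first comparison).
def getManhattanDistance (s1 s2 : Int × Int) : Int :=
  |s1.1 - s2.1| + |s1.2 - s2.2|

def getClosestFromList (listOfPositions : List (Int × Int)) (referencePosition : Int × Int) : Int :=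
  let st := (PySem.List.pyRange 0 (listOfPositions.length : Int) 1).foldl
    (fun (s : Int × Option Int) i =>
      let curDist := getManhattanDistance referencePosition (PySem.List.pyGetD listOfPositions i (0, 0))
      match s.2 with
      | none => (i, some curDist)            -- curDist < inf
      | some minDist => if curDist < minDist then (i, some curDist) else s)
    ((0 : Int), (none : Option Int))
  st.1

-- ===== PORT B =====
-- the sort key: distance of listOfPositions[i] from referencePosition (i always in range)
def pvKey (listOfPositions : List (Int × Int)) (referencePosition : Int × Int) (i : Int) : Int :=
  |referencePosition.1 - (PySem.List.pyGetD listOfPositions i (0, 0)).1|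
    + |referencePosition.2 - (PySem.List.pyGetD listOfPositions i (0, 0)).2|

def getClosestFromList_alt (listOfPositions : List (Int × Int)) (referencePosition : Int × Int) : Int :=
  let order := PySem.List.sorted (PySem.List.pyRange 0 (listOfPositions.length : Int) 1)
    (pvKey listOfPositions referencePosition) false
  match order with
  | [] => 0
  | h :: _ => h

-- ===== PRECONDITION & SPEC =====
def Spec_getClosestFromList (listOfPositions : List (Int × Int)) (referencePosition : Int × Int) (out : Int) : Prop := out = getClosestFromList_alt listOfPositions referencePosition
instance (listOfPositions : List (Int × Int)) (referencePosition : Int × Int) (out : Int) : Decidable (Spec_getClosestFromList listOfPositions referencePosition out) := by unfold Spec_getClosestFromList; infer_instance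

-- ===== CLAIM (what is proved, stated in full; the proofs are below) =====
def Claim_equal_getClosestFromList : Prop := ∀ (listOfPositions : List (Int × Int)) (referencePosition : Int × Int), Dom_getClosestFromList listOfPositions referencePosition → Spec_getClosestFromList listOfPositions referencePosition (getClosestFromList listOfPositions referencePosition)

-- ===== LEMMAS AND PROOFS =====

-- the first-minimum fold over a list of indices (an Option accumulator)
def pvOptFold (k : Int → Int) (is : List Int) (acc : Option Int) : Option Int :=
  is.foldl (fun acc i =>
    match acc with
    | none => some i
    | some b => if k i < k b then some i else acc) acc

-- head of insertBy into a nonempty list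
theorem pvHead_insertBy (k : Int → Int) (x h : Int) (t : List Int) :
    PySem.List.insertBy (fun a b => decide (k a < k b)) x (h :: t) =
      if k x < k h then x :: h :: t
      else h :: PySem.List.insertBy (fun a b => decide (k a < k b)) x t := by
  by_cases hc : k x < k h
  · rw [if_pos hc]; simp [PySem.List.insertBy, hc]
  · rw [if_neg hc]; simp [PySem.List.insertBy, hc]

-- head of the stable sort = the first-minimum fold
theorem pvSorted_head (k : Int → Int) (is : List Int) :
    (PySem.List.sorted is k false).head? = pvOptFold k is none := by
  rw [PySem.List.sorted_eq_foldl_insertBy]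
  induction is using List.reverseRecOn with
  | nil => simp [pvOptFold]
  | append_singleton t x ih =>
      rw [pvOptFold, List.foldl_append, List.foldl_append]
      simp only [List.foldl_cons, List.foldl_nil]
      rw [← pvOptFold]
      cases hs : t.foldl (fun acc x => PySem.List.insertBy (fun a b => decide (k a < k b)) x acc) [] with
      | nil =>
          have : pvOptFold k t none = none := by rw [← ih, hs]; rfl
          rw [this]
          simp [PySem.List.insertBy]
      | cons h rest =>
          have : pvOptFold k t none = some h := by rw [← ih, hs]; rfl
          rw [this, pvHead_insertBy]
          by_cases hxh : k x < k h <;> simp [hxh]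

-- the option fold started from a committed value never returns none
theorem pvOptFold_some_ne_none (k : Int → Int) (is : List Int) (b : Int) :
    pvOptFold k is (some b) ≠ none := by
  induction is generalizing b with
  | nil => simp [pvOptFold]
  | cons j t ih =>
      simp only [pvOptFold, List.foldl_cons]
      split <;> [exact ih _; exact ih _]

-- A's loop from a committed state (mi, some (k mi)) tracks the option fold from some mi
theorem pvA_fold_some (k : Int → Int) (is : List Int) (mi : Int) :
    is.foldl (fun (s : Int × Option Int) i =>
        match s.2 with
        | none => (i, some (k i))
        | some m => if k i < m then (i, some (k i)) else s) (mi, some (k mi)) =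
      ((pvOptFold k is (some mi)).getD 0, some (k ((pvOptFold k is (some mi)).getD 0))) := by
  induction is generalizing mi with
  | nil => simp [pvOptFold]
  | cons i t ih =>
      simp only [List.foldl_cons, pvOptFold, List.foldl_cons]
      by_cases h : k i < k mi
      · rw [if_pos h, if_pos h]; exact ih i
      · rw [if_neg h, if_neg h]; exact ih mi

-- ===== VERDICT (by name: the statement is the Claim_ definition above) =====
theorem getClosestFromList_spec : Claim_equal_getClosestFromList := by
  intro l r _
  unfold Spec_getClosestFromList getClosestFromList getClosestFromList_alt
  have hgm : ∀ i, getManhattanDistance r (PySem.List.pyGetD l i (0, 0)) = pvKey l r i :=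
    fun i => rfl
  simp only [hgm]
  cases l with
  | nil =>
      have h0 : PySem.List.pyRange 0 (([] : List (Int × Int)).length : Int) 1 = [] := rfl
      rw [h0]
      rfl
  | cons p rest =>
      have hpos : (0 : Int) < ((p :: rest).length : Int) := by
        exact_mod_cast Nat.succ_pos rest.length
      have hhead := pvSorted_head (pvKey (p :: rest) r)
        (PySem.List.pyRange 0 ((p :: rest).length : Int) 1)
      rw [PySem.List.pyRange_one_cons hpos] at hhead ⊢
      have hstep : pvOptFold (pvKey (p :: rest) r)
          (0 :: PySem.List.pyRange (0 + 1) ((p :: rest).length : Int) 1) none =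
        pvOptFold (pvKey (p :: rest) r)
          (PySem.List.pyRange (0 + 1) ((p :: rest).length : Int) 1) (some 0) := rfl
      rw [hstep] at hhead
      simp only [List.foldl_cons]
      rw [pvA_fold_some (pvKey (p :: rest) r)
        (PySem.List.pyRange (0 + 1) ((p :: rest).length : Int) 1) 0]
      cases hsort : PySem.List.sorted (0 :: PySem.List.pyRange (0 + 1) ((p :: rest).length : Int) 1)
          (pvKey (p :: rest) r) false with
      | nil =>
          rw [hsort] at hhead
          exact absurd hhead.symm (pvOptFold_some_ne_none _ _ _)
      | cons h tl =>
          rw [hsort] at hhead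
          simp only [List.head?_cons] at hhead
          rw [← hhead]
          rfl
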